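-- pv_equiv track=rewrite | github.com/shkim9604/programmers_coding_test | level0/진료순서 정하기.py | solution
-- ===== SOURCE A (Python) =====
-- def solution(emergency):
--     answer = []
--     result = sorted(emergency,reverse=True) # 응급도 높은순서로 정렬
--     order = {} # 응급도순위와 진료순서 를 매칭
--     for i in range(1,len(emergency)+1):
--         order[result[i-1]] = i
--     for i in emergency:
--         answer.append(order[i])
--     return answer
-- ===== SOURCE B (Python) =====
-- def solution(emergency):
--     # rank of e = number of elements >= e (ties get the same rank, matching
--     # A's dict-overwrite-to-last-sorted-index behaviour)
--     return [sum(1 for x in emergency if x >= e) for e in emergency]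
-- ===== Notes on version B (the rewrite author's own statement) =====
-- stated objective: simpler
-- what changed: Replaces A's sort + index dict with a direct one-line counting comprehension: each element's rank is the number of elements >= it.
import Mathlib
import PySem

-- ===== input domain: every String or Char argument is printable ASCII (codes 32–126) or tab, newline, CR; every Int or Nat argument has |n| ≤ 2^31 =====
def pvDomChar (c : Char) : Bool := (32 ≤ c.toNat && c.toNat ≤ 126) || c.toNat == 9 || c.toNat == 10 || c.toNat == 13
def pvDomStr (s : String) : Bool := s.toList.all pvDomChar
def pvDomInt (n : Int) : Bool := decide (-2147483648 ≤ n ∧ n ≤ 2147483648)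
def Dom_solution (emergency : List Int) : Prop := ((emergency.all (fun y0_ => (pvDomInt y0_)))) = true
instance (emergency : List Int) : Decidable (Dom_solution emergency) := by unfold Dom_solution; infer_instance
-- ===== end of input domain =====

-- B replaces A's sort + index-dict with a direct counting comprehension (simpler).

-- ===== PORT A =====
-- indices result[i-1] (0 ≤ i-1 < len) and keys order[i] (i ∈ result) are always
-- present in the Python, so pyGetD / Dict.getD with default 0 are exact here.
def solution (emergency : List Int) : List Int :=
  let result := PySem.List.sorted emergency (fun x => x) true
  let order := (PySem.List.pyRange 1 ((emergency.length : Int) + 1) 1).foldl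
    (fun d i => d.insert (PySem.List.pyGetD result (i - 1) 0) i) PySem.Dict.empty
  emergency.foldl (fun answer i => answer ++ [order.getD i 0]) []

-- ===== PORT B =====
def solution_alt (emergency : List Int) : List Int :=
  emergency.map (fun e => emergency.foldl (fun acc x => if e ≤ x then acc + 1 else acc) (0 : Int))

-- ===== PRECONDITION & SPEC =====
def Spec_solution (emergency : List Int) (out : List Int) : Prop := out = solution_alt emergency
instance (emergency : List Int) (out : List Int) : Decidable (Spec_solution emergency out) := by unfold Spec_solution; infer_instance

-- ===== CLAIM (what is proved, stated in full; the proofs are below) =====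
def Claim_equal_solution : Prop := ∀ (emergency : List Int), Dom_solution emergency → Spec_solution emergency (solution emergency)

-- ===== LEMMAS AND PROOFS =====

-- dict built by A's index loop, abstractly: insert r[k] with value s+k+1, left to right
def buildD : List Int → Int → PySem.Dict Int Int → PySem.Dict Int Int
  | [], _, d => d
  | a :: t, s, d => buildD t (s + 1) (d.insert a (s + 1))

theorem buildD_append (r : List Int) (a : Int) (s : Int) (d : PySem.Dict Int Int) :
    buildD (r ++ [a]) s d = (buildD r s d).insert a (s + (r.length : Int) + 1) := by
  induction r generalizing s d with
  | nil => simp [buildD]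
  | cons b t ih => simp [buildD, ih]; ring_nf

theorem getD_buildD_not_mem (r : List Int) (e s : Int) (d : PySem.Dict Int Int)
    (he : e ∉ r) : (buildD r s d).getD e 0 = d.getD e 0 := by
  induction r generalizing s d with
  | nil => rfl
  | cons a t ih =>
    simp only [List.mem_cons, not_or] at he
    rw [buildD, ih _ _ he.2, PySem.Dict.getD_insert_of_ne _ _ _ he.1]

theorem getD_buildD_mem (r : List Int) (e s : Int) (d : PySem.Dict Int Int)
    (hp : r.Pairwise (fun x y => y ≤ x)) (he : e ∈ r) :
    (buildD r s d).getD e 0 = s + (r.countP (fun x => e ≤ x) : Int) := by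
  induction r generalizing s d with
  | nil => simp at he
  | cons a t ih =>
    rw [List.pairwise_cons] at hp
    by_cases het : e ∈ t
    · have hea : e ≤ a := hp.1 e het
      rw [buildD, ih _ _ hp.2 het, List.countP_cons]
      simp [hea]; ring
    · have hea : e = a := (List.mem_cons.mp he).resolve_right het
      subst hea
      rw [buildD, getD_buildD_not_mem _ _ _ _ het, PySem.Dict.getD_insert_self,
        List.countP_cons]
      have ht0 : t.countP (fun x => e ≤ x) = 0 := by
        rw [List.countP_eq_zero]
        intro x hx
        simp only [decide_eq_true_eq]
        intro hle
        exact het (le_antisymm (hp.1 x hx) hle ▸ hx)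
      simp [ht0]

theorem bridge (r : List Int) (d : PySem.Dict Int Int) :
    (PySem.List.pyRange 1 ((r.length : Int) + 1) 1).foldl
      (fun d i => d.insert (PySem.List.pyGetD r (i - 1) 0) i) d = buildD r 0 d := by
  suffices h : ∀ (r2 : List Int), (∀ k : Nat, k < r2.length → r2[k]? = r[k]?) →
      r2.length ≤ r.length →
      (PySem.List.pyRange 1 ((r2.length : Int) + 1) 1).foldl
        (fun d i => d.insert (PySem.List.pyGetD r (i - 1) 0) i) d = buildD r2 0 d by
    exact h r (fun _ _ => rfl) le_rfl
  intro r2 hpre hlen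
  induction r2 using List.reverseRecOn generalizing d with
  | nil => simp [PySem.List.pyRange_one_eq_nil, buildD]
  | append_singleton t a ih =>
    rw [List.length_append, List.length_singleton]
    have hsplit : PySem.List.pyRange 1 ((((t.length + 1 : Nat)) : Int) + 1) 1 =
        PySem.List.pyRange 1 ((t.length : Int) + 1) 1 ++ [((t.length : Int) + 1)] := by
      have h2 : ((((t.length + 1 : Nat)) : Int) + 1) = ((t.length : Int) + 1) + 1 := by push_cast; ring
      rw [h2, PySem.List.pyRange_one_succ_right (by omega)]
    rw [hsplit, List.foldl_append]
    have hpre' : ∀ k : Nat, k < t.length → t[k]? = r[k]? := by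
      intro k hk
      rw [← hpre k (by simp; omega)]
      rw [List.getElem?_append_left hk]
    have hih := ih d hpre' (by simp at hlen; omega)
    rw [hih]
    simp only [List.foldl_cons, List.foldl_nil]
    rw [buildD_append]
    congr 1
    · -- the inserted key: r[(t.length+1)-1] = a
      have hk : (t ++ [a])[t.length]? = r[t.length]? := hpre t.length (by simp)
      rw [List.getElem?_append_right le_rfl] at hk
      simp at hk
      have : PySem.List.pyGetD r ((t.length : Int) + 1 - 1) 0 = a := by
        have h1 : ((t.length : Int) + 1 - 1) = ((t.length : Nat) : Int) := by ring
        rw [h1, PySem.List.pyGetD_natCast]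
        simp [List.getD, ← hk]
      exact this
    · ring

theorem solution_eq (emergency : List Int) : solution emergency = solution_alt emergency := by
  unfold solution solution_alt
  simp only []
  set r := PySem.List.sorted emergency (fun x => x) true with hr
  have hlen : r.length = emergency.length := PySem.List.length_sorted ..
  rw [← hlen, bridge]
  rw [PySem.List.foldl_append_singleton_eq_map, List.nil_append]
  apply List.map_congr_left
  intro e he
  have hmem : e ∈ r := (PySem.List.mem_sorted ..).mpr he
  have hp : r.Pairwise (fun x y => y ≤ x) := PySem.List.sorted_pairwise_rev ..
  rw [getD_buildD_mem r e 0 _ hp hmem, zero_add]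
  have hperm : r.Perm emergency := PySem.List.sorted_perm ..
  rw [hperm.countP_eq]
  rw [PySem.List.foldl_ite_add_one (fun x => e ≤ x), zero_add]

-- ===== VERDICT (by name: the statement is the Claim_ definition above) =====
theorem solution_spec : Claim_equal_solution := by
  intro emergency _
  exact solution_eq emergency
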